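-- pv_equiv track=rewrite | github.com/NeonFoundry/TalesWeaverImageExtractor | hdt_converter.py | find_best_dimensions
-- ===== SOURCE A (Python) =====
-- import math
-- from typing import Tuple, List, Optional
--
-- def find_best_dimensions(pixel_count: int, width_hint: int = 0) -> Tuple[int, int]:
--     """Find the best width x height for a given pixel count.
--
--     Prioritizes dimensions that are close to square.
--
--     Args:
--         pixel_count: Total number of pixels
--         width_hint: Optional hint for width (e.g., from count field)
--     """
--     if pixel_count <= 0:
--         return (1, 1)
--
--     # If width_hint > 1 and divides evenly, use it
--     if width_hint > 1 and pixel_count % width_hint == 0: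
--         height = pixel_count // width_hint
--         if 4 <= height <= 4096:
--             return (width_hint, height)
--
--     # Find the dimension closest to square root
--     sqrt_val = int(math.sqrt(pixel_count))
--
--     # Search outward from sqrt to find exact divisor
--     best_w, best_h = pixel_count, 1
--
--     for offset in range(sqrt_val + 1):
--         # Try sqrt - offset
--         w = sqrt_val - offset
--         if w >= 4 and pixel_count % w == 0:
--             h = pixel_count // w
--             if 4 <= h <= 4096:
--                 best_w, best_h = max(w, h), min(w, h)
--                 break
--
--         # Try sqrt + offset
--         w = sqrt_val + offset
--         if w >= 4 and pixel_count % w == 0: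
--             h = pixel_count // w
--             if 4 <= h <= 4096:
--                 best_w, best_h = max(w, h), min(w, h)
--                 break
--
--     return (best_w, best_h)
-- ===== SOURCE B (Python) =====
-- import math
--
-- def find_best_dimensions(pixel_count: int, width_hint: int = 0):
--     """Find the best width x height for a given pixel count.
--
--     Prefers dimensions close to square."""
--     if pixel_count <= 0:
--         return (1, 1)
--
--     if width_hint > 1 and pixel_count % width_hint == 0:
--         height = pixel_count // width_hint
--         if 4 <= height <= 4096:
--             return (width_hint, height)
--
--     sqrt_val = int(math.sqrt(pixel_count))
--
--     # One forward pass over the search window [4, 2*sqrt_val] around the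
--     # square root: keep the divisor width with the smallest key
--     # (distance to the root, then the width itself).
--     best = None
--     for w in range(4, 2 * sqrt_val + 1):
--         if pixel_count % w == 0 and 4 <= pixel_count // w <= 4096:
--             key = (abs(w - sqrt_val), w)
--             if best is None or key < best[0]:
--                 best = (key, w)
--
--     if best is None:
--         return (pixel_count, 1)
--     w = best[1]
--     h = pixel_count // w
--     return (max(w, h), min(w, h))
-- ===== Notes on version B (the rewrite author's own statement) =====
-- stated objective: simpler
-- what changed: A interleaves a two-sided outward scan from the square root with a first-hit break; B makes one plain forward pass over the search window keeping the width with the smallest (distance-to-root, width) key.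
import Mathlib
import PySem

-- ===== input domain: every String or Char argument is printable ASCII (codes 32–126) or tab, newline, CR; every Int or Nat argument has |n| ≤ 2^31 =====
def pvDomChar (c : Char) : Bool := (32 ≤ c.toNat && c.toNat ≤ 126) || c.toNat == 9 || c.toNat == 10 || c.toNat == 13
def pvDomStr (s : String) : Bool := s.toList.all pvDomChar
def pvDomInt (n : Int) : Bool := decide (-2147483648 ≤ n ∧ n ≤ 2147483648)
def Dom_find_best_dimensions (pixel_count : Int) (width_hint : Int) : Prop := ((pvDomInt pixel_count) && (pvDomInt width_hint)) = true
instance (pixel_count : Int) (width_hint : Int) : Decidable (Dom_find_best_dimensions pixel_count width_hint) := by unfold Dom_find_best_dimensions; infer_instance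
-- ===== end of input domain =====

-- B replaces A's outward two-sided scan-with-break from the square root by one forward
-- pass over the search window keeping the key-minimal admissible width (objective: simpler).

-- int(math.sqrt(n)) for 0 ≤ n; on the stated domain |n| ≤ 2^31 the float sqrt's floor
-- equals the integer square root, so this transcription is exact there.
def fbdSqrt (n : Int) : Int := (n.toNat.sqrt : Int)

-- ===== PORT A =====
-- the 'for offset in range(sqrt_val + 1)' loop with its two try-and-break branches
def fbdLoopA (n s : Int) : List Int → Int × Int
  | [] => (n, 1)
  | o :: rest =>
    let w1 := s - o
    if 4 ≤ w1 ∧ PySem.Int.mod n w1 = 0 ∧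
        4 ≤ PySem.Int.floordiv n w1 ∧ PySem.Int.floordiv n w1 ≤ 4096 then
      (max w1 (PySem.Int.floordiv n w1), min w1 (PySem.Int.floordiv n w1))
    else
      let w2 := s + o
      if 4 ≤ w2 ∧ PySem.Int.mod n w2 = 0 ∧
          4 ≤ PySem.Int.floordiv n w2 ∧ PySem.Int.floordiv n w2 ≤ 4096 then
        (max w2 (PySem.Int.floordiv n w2), min w2 (PySem.Int.floordiv n w2))
      else fbdLoopA n s rest

def find_best_dimensions (pixel_count : Int) (width_hint : Int) : Int × Int :=
  if pixel_count ≤ 0 then (1, 1)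
  else if 1 < width_hint ∧ PySem.Int.mod pixel_count width_hint = 0 ∧
      4 ≤ PySem.Int.floordiv pixel_count width_hint ∧
      PySem.Int.floordiv pixel_count width_hint ≤ 4096 then
    (width_hint, PySem.Int.floordiv pixel_count width_hint)
  else
    fbdLoopA pixel_count (fbdSqrt pixel_count)
      (PySem.List.pyRange 0 (fbdSqrt pixel_count + 1) 1)

-- ===== PORT B =====
-- the body of B's 'for w in range(4, 2*sqrt_val + 1)' loop: best is None or ((abs(w-s), w), w)
def fbdStep (n s : Int) (best : Option ((Int × Int) × Int)) (w : Int) : Option ((Int × Int) × Int) :=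
  if PySem.Int.mod n w = 0 ∧ 4 ≤ PySem.Int.floordiv n w ∧ PySem.Int.floordiv n w ≤ 4096 then
    match best with
    | none => some ((|w - s|, w), w)
    | some b =>
      if |w - s| < b.1.1 ∨ (|w - s| = b.1.1 ∧ w < b.1.2) then some ((|w - s|, w), w)
      else some b
  else best

def fbdScan (n s : Int) : Option ((Int × Int) × Int) :=
  (PySem.List.pyRange 4 (2 * s + 1) 1).foldl (fbdStep n s) none

def find_best_dimensions_alt (pixel_count : Int) (width_hint : Int) : Int × Int :=
  if pixel_count ≤ 0 then (1, 1)
  else if 1 < width_hint ∧ PySem.Int.mod pixel_count width_hint = 0 ∧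
      4 ≤ PySem.Int.floordiv pixel_count width_hint ∧
      PySem.Int.floordiv pixel_count width_hint ≤ 4096 then
    (width_hint, PySem.Int.floordiv pixel_count width_hint)
  else
    match fbdScan pixel_count (fbdSqrt pixel_count) with
    | none => (pixel_count, 1)
    | some b =>
      (max b.2 (PySem.Int.floordiv pixel_count b.2),
       min b.2 (PySem.Int.floordiv pixel_count b.2))

-- ===== PRECONDITION & SPEC =====
def Spec_find_best_dimensions (pixel_count : Int) (width_hint : Int) (out : Int × Int) : Prop := out = find_best_dimensions_alt pixel_count width_hint
instance (pixel_count : Int) (width_hint : Int) (out : Int × Int) : Decidable (Spec_find_best_dimensions pixel_count width_hint out) := by unfold Spec_find_best_dimensions; infer_instance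

-- ===== CLAIM (what is proved, stated in full; the proofs are below) =====
def Claim_equal_find_best_dimensions : Prop := ∀ (pixel_count : Int) (width_hint : Int), Dom_find_best_dimensions pixel_count width_hint → Spec_find_best_dimensions pixel_count width_hint (find_best_dimensions pixel_count width_hint)

-- ===== LEMMAS AND PROOFS =====

-- the admissible-width predicate: w is a width A's search can return, s = isqrt n
def fbdQ (n s w : Int) : Prop :=
  4 ≤ w ∧ w ≤ 2 * s ∧ PySem.Int.mod n w = 0 ∧
    4 ≤ PySem.Int.floordiv n w ∧ PySem.Int.floordiv n w ≤ 4096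

-- the divisibility-and-height condition B checks inside its loop
def fbdC (n w : Int) : Prop :=
  PySem.Int.mod n w = 0 ∧ 4 ≤ PySem.Int.floordiv n w ∧ PySem.Int.floordiv n w ≤ 4096

-- the strict tuple-key order (abs(w - s), w)
def fbdLt (s a b : Int) : Prop := |a - s| < |b - s| ∨ (|a - s| = |b - s| ∧ a < b)

-- B's loop body with the accumulator reduced to the width it carries
def fbdStep' (n s : Int) (o : Option Int) (w : Int) : Option Int :=
  if PySem.Int.mod n w = 0 ∧ 4 ≤ PySem.Int.floordiv n w ∧ PySem.Int.floordiv n w ≤ 4096 then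
    match o with
    | none => some w
    | some a => if |w - s| < |a - s| ∨ (|w - s| = |a - s| ∧ w < a) then some w else some a
  else o

theorem fbd_sqrt_spec (n : Int) (hn : 0 < n) :
    0 ≤ fbdSqrt n ∧ fbdSqrt n * fbdSqrt n ≤ n ∧ n < (fbdSqrt n + 1) * (fbdSqrt n + 1) := by
  unfold fbdSqrt
  have h1 := Nat.sqrt_le' n.toNat
  have h2 := Nat.lt_succ_sqrt' n.toNat
  rw [pow_two] at h1
  rw [Nat.succ_eq_add_one, pow_two] at h2
  have hn' : ((n.toNat : Int)) = n := by omega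
  refine ⟨by positivity, ?_, ?_⟩
  · rw [← hn']; exact_mod_cast h1
  · conv_lhs => rw [← hn']
    exact_mod_cast h2

theorem fbd_notLt_trans (s a b c : Int) (h1 : ¬ fbdLt s a b) (h2 : ¬ fbdLt s b c) : ¬ fbdLt s a c := by
  simp only [fbdLt, Int.abs_eq_natAbs, not_or, not_and, not_lt] at *
  omega

theorem fbd_lt_asymm (s a b : Int) (h : fbdLt s a b) : ¬ fbdLt s b a := by
  simp only [fbdLt, Int.abs_eq_natAbs, not_or, not_and, not_lt] at *
  omega

-- the step commutes with expanding the carried width back to ((|a-s|, a), a)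
theorem fbd_step_comm (n s : Int) (o : Option Int) (w : Int) :
    fbdStep n s (o.map (fun a => ((|a - s|, a), a))) w
      = (fbdStep' n s o w).map (fun a => ((|a - s|, a), a)) := by
  cases o with
  | none => unfold fbdStep fbdStep'; split_ifs <;> rfl
  | some a =>
    unfold fbdStep fbdStep'
    simp only [Option.map_some]
    split_ifs <;> rfl

theorem fbd_fold_comm (n s : Int) (L : List Int) (o : Option Int) :
    L.foldl (fbdStep n s) (o.map (fun a => ((|a - s|, a), a)))
      = (L.foldl (fbdStep' n s) o).map (fun a => ((|a - s|, a), a)) := by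
  induction L generalizing o with
  | nil => rfl
  | cons y t ih =>
    rw [List.foldl_cons, List.foldl_cons, fbd_step_comm, ih]

-- characterization of B's reduced fold: none means nothing admissible was seen,
-- some m means m is admissible and key-minimal among the admissible elements seen
theorem fbd_fold_inv (n s : Int) (L : List Int) :
    ∀ o : Option Int, (∀ a, o = some a → fbdC n a) →
      (L.foldl (fbdStep' n s) o = none → o = none ∧ ∀ w ∈ L, ¬ fbdC n w) ∧
      (∀ m, L.foldl (fbdStep' n s) o = some m →
        fbdC n m ∧ (o = some m ∨ m ∈ L) ∧
        (∀ w ∈ L, fbdC n w → ¬ fbdLt s w m) ∧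
        (∀ a, o = some a → ¬ fbdLt s a m)) := by
  induction L with
  | nil =>
    intro o ho
    refine ⟨fun h => ⟨h, by simp⟩, ?_⟩
    intro m hm
    simp only [List.foldl_nil] at hm
    refine ⟨ho m hm, Or.inl hm, by simp, ?_⟩
    intro a ha
    rw [hm] at ha
    injection ha with h
    subst h
    simp [fbdLt]
  | cons y t ih =>
    intro o ho
    rw [List.foldl_cons]
    by_cases hcy : fbdC n y
    · have hcy' : PySem.Int.mod n y = 0 ∧ 4 ≤ PySem.Int.floordiv n y ∧
          PySem.Int.floordiv n y ≤ 4096 := hcy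
      cases o with
      | none =>
        have hso : fbdStep' n s none y = some y := by
          unfold fbdStep'; rw [if_pos hcy']
        rw [hso]
        have IH := ih (some y) (by intro a ha; injection ha with h; exact h ▸ hcy)
        refine ⟨fun hnone => absurd ((IH.1 hnone).1) (by simp), ?_⟩
        intro m hm
        obtain ⟨hcm, hmem, hmint, hys⟩ := IH.2 m hm
        have hym : ¬ fbdLt s y m := hys y rfl
        refine ⟨hcm, ?_, ?_, ?_⟩
        · rcases hmem with h | h
          · injection h with h'; exact Or.inr (h' ▸ List.mem_cons_self)
          · exact Or.inr (List.mem_cons_of_mem _ h)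
        · intro w hw hcw
          rcases List.mem_cons.mp hw with rfl | hw'
          · exact hym
          · exact hmint w hw' hcw
        · intro a ha; exact absurd ha (by simp)
      | some a =>
        have hca : fbdC n a := ho a rfl
        by_cases hlt : |y - s| < |a - s| ∨ (|y - s| = |a - s| ∧ y < a)
        · have hso : fbdStep' n s (some a) y = some y := by
            unfold fbdStep'; rw [if_pos hcy']; exact if_pos hlt
          rw [hso]
          have IH := ih (some y) (by intro a' ha'; injection ha' with h; exact h ▸ hcy)
          refine ⟨fun hnone => absurd ((IH.1 hnone).1) (by simp), ?_⟩
          intro m hm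
          obtain ⟨hcm, hmem, hmint, hys⟩ := IH.2 m hm
          have hym : ¬ fbdLt s y m := hys y rfl
          have hya : fbdLt s y a := hlt
          refine ⟨hcm, ?_, ?_, ?_⟩
          · rcases hmem with h | h
            · injection h with h'; exact Or.inr (h' ▸ List.mem_cons_self)
            · exact Or.inr (List.mem_cons_of_mem _ h)
          · intro w hw hcw
            rcases List.mem_cons.mp hw with rfl | hw'
            · exact hym
            · exact hmint w hw' hcw
          · intro a' ha'
            injection ha' with h'
            exact h' ▸ fbd_notLt_trans s a y m (fbd_lt_asymm s y a hya) hym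
        · have hso : fbdStep' n s (some a) y = some a := by
            unfold fbdStep'; rw [if_pos hcy']; exact if_neg hlt
          rw [hso]
          have IH := ih (some a) (by intro a' ha'; injection ha' with h; exact h ▸ hca)
          refine ⟨fun hnone => absurd ((IH.1 hnone).1) (by simp), ?_⟩
          intro m hm
          obtain ⟨hcm, hmem, hmint, has⟩ := IH.2 m hm
          have ham : ¬ fbdLt s a m := has a rfl
          have hya : ¬ fbdLt s y a := hlt
          refine ⟨hcm, ?_, ?_, ?_⟩
          · rcases hmem with h | h
            · exact Or.inl h
            · exact Or.inr (List.mem_cons_of_mem _ h)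
          · intro w hw hcw
            rcases List.mem_cons.mp hw with rfl | hw'
            · exact fbd_notLt_trans s w a m hya ham
            · exact hmint w hw' hcw
          · intro a' ha'
            injection ha' with h'
            exact h' ▸ ham
    · have hso : fbdStep' n s o y = o := by
        unfold fbdStep'; exact if_neg hcy
      rw [hso]
      have IH := ih o ho
      refine ⟨?_, ?_⟩
      · intro hnone
        obtain ⟨h1, h2⟩ := IH.1 hnone
        refine ⟨h1, ?_⟩
        intro w hw
        rcases List.mem_cons.mp hw with rfl | hw'
        · exact hcy
        · exact h2 w hw'
      · intro m hm
        obtain ⟨hcm, hmem, hmint, has⟩ := IH.2 m hm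
        refine ⟨hcm, ?_, ?_, has⟩
        · rcases hmem with h | h
          · exact Or.inl h
          · exact Or.inr (List.mem_cons_of_mem _ h)
        · intro w hw hcw
          rcases List.mem_cons.mp hw with rfl | hw'
          · exact absurd hcw hcy
          · exact hmint w hw' hcw

-- the A-side loop when no admissible width exists at all
theorem fbd_loopA_none (n s : Int) (hs : 0 ≤ s) (hno : ∀ w, ¬ fbdQ n s w) :
    ∀ t : Int, 0 ≤ t → fbdLoopA n s (PySem.List.pyRange t (s + 1) 1) = (n, 1) := by
  have key : ∀ (k : Nat) (t : Int), 0 ≤ t → (s + 1 - t).toNat = k →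
      fbdLoopA n s (PySem.List.pyRange t (s + 1) 1) = (n, 1) := by
    intro k
    induction k with
    | zero =>
      intro t ht hk
      rw [PySem.List.pyRange_one]
      simp [hk]
      rfl
    | succ k ih =>
      intro t ht hk
      rw [PySem.List.pyRange_one_cons (by omega : t < s + 1)]
      simp only [fbdLoopA]
      rw [if_neg, if_neg]
      · exact ih (t + 1) (by omega) (by omega)
      · rintro ⟨h1, h2, h3, h4⟩
        exact hno (s + t) ⟨h1, by omega, h2, h3, h4⟩
      · rintro ⟨h1, h2, h3, h4⟩
        exact hno (s - t) ⟨h1, by omega, h2, h3, h4⟩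
  intro t ht
  exact key (s + 1 - t).toNat t ht rfl

-- the A-side loop when m is the key-minimal admissible width
theorem fbd_loopA_found (n s m : Int) (hq : fbdQ n s m)
    (hmin : ∀ w, fbdQ n s w → ¬ fbdLt s w m) :
    ∀ t : Int, 0 ≤ t → t ≤ |m - s| →
    fbdLoopA n s (PySem.List.pyRange t (s + 1) 1) =
      (max m (PySem.Int.floordiv n m), min m (PySem.Int.floordiv n m)) := by
  obtain ⟨hm4, hm2s, hmmod, hmh4, hmh⟩ := hq
  have habs : |m - s| = ((m - s).natAbs : Int) := Int.abs_eq_natAbs _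
  have key : ∀ (k : Nat) (t : Int), 0 ≤ t → t ≤ |m - s| → (|m - s| - t).toNat = k →
      fbdLoopA n s (PySem.List.pyRange t (s + 1) 1) =
        (max m (PySem.Int.floordiv n m), min m (PySem.Int.floordiv n m)) := by
    intro k
    induction k with
    | zero =>
      intro t ht htm hk
      have hteq : t = |m - s| := by rw [habs] at htm hk ⊢; omega
      rw [PySem.List.pyRange_one_cons (by omega : t < s + 1)]
      simp only [fbdLoopA]
      by_cases hcase : m ≤ s
      · have hmw : s - t = m := by rw [habs] at hteq; omega
        rw [hmw, if_pos ⟨hm4, hmmod, hmh4, hmh⟩]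
      · have hmw : s + t = m := by rw [habs] at hteq; omega
        have ht1 : 1 ≤ t := by omega
        rw [if_neg, hmw, if_pos ⟨hm4, hmmod, hmh4, hmh⟩]
        rintro ⟨h1, h2, h3, h4⟩
        refine hmin (s - t) ⟨h1, by omega, h2, h3, h4⟩ ?_
        right
        constructor
        · rw [habs, Int.abs_eq_natAbs]; omega
        · omega
    | succ k ih =>
      intro t ht htm hk
      have htlt : t < |m - s| := by rw [habs] at htm hk ⊢; omega
      have hmsle : |m - s| ≤ s := by rw [habs]; omega
      rw [PySem.List.pyRange_one_cons (by omega : t < s + 1)]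
      simp only [fbdLoopA]
      rw [if_neg, if_neg]
      · exact ih (t + 1) (by omega) (by rw [habs] at htlt ⊢; omega) (by rw [habs] at hk htlt ⊢; omega)
      · rintro ⟨h1, h2, h3, h4⟩
        refine hmin (s + t) ⟨h1, by omega, h2, h3, h4⟩ ?_
        left; rw [habs, Int.abs_eq_natAbs]; omega
      · rintro ⟨h1, h2, h3, h4⟩
        refine hmin (s - t) ⟨h1, by omega, h2, h3, h4⟩ ?_
        left; rw [habs, Int.abs_eq_natAbs]; omega
  intro t ht htm
  exact key (|m - s| - t).toNat t ht htm rfl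

-- fbdQ is exactly: within B's window and B's loop condition
theorem fbd_Q_iff (n s w : Int) :
    fbdQ n s w ↔ w ∈ PySem.List.pyRange 4 (2 * s + 1) 1 ∧ fbdC n w := by
  rw [PySem.List.mem_pyRange_one]
  unfold fbdQ fbdC
  constructor
  · rintro ⟨h1, h2, h3, h4, h5⟩; exact ⟨⟨h1, by omega⟩, h3, h4, h5⟩
  · rintro ⟨⟨h1, h2⟩, h3, h4, h5⟩; exact ⟨h1, by omega, h3, h4, h5⟩

-- ===== VERDICT (by name: the statement is the Claim_ definition above) =====
theorem find_best_dimensions_spec : Claim_equal_find_best_dimensions := by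
  intro n wh hDom
  unfold Spec_find_best_dimensions find_best_dimensions find_best_dimensions_alt
  by_cases hn : n ≤ 0
  · rw [if_pos hn, if_pos hn]
  · rw [if_neg hn, if_neg hn]
    by_cases hh : 1 < wh ∧ PySem.Int.mod n wh = 0 ∧
        4 ≤ PySem.Int.floordiv n wh ∧ PySem.Int.floordiv n wh ≤ 4096
    · rw [if_pos hh, if_pos hh]
    · rw [if_neg hh, if_neg hh]
      have hn' : 0 < n := by omega
      obtain ⟨hs, hsl, hsu⟩ := fbd_sqrt_spec n hn'
      set s := fbdSqrt n with hsdef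
      have hscan : fbdScan n s
          = (( PySem.List.pyRange 4 (2 * s + 1) 1).foldl (fbdStep' n s) none).map
              (fun a => ((|a - s|, a), a)) := by
        unfold fbdScan
        have := fbd_fold_comm n s (PySem.List.pyRange 4 (2 * s + 1) 1) none
        simpa using this
      have hinv := fbd_fold_inv n s (PySem.List.pyRange 4 (2 * s + 1) 1) none (by simp)
      cases hr : (PySem.List.pyRange 4 (2 * s + 1) 1).foldl (fbdStep' n s) none with
      | none =>
        rw [hscan, hr]
        simp only [Option.map_none]
        have hno : ∀ w, ¬ fbdQ n s w := by
          intro w hQ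
          obtain ⟨hmem, hc⟩ := (fbd_Q_iff n s w).mp hQ
          exact (hinv.1 hr).2 w hmem hc
        simpa using fbd_loopA_none n s hs hno 0 le_rfl
      | some m =>
        rw [hscan, hr]
        simp only [Option.map_some]
        obtain ⟨hcm, hmem, hmint, -⟩ := hinv.2 m hr
        have hmemr : m ∈ PySem.List.pyRange 4 (2 * s + 1) 1 := by
          rcases hmem with h | h
          · exact absurd h (by simp)
          · exact h
        have hQm : fbdQ n s m := (fbd_Q_iff n s m).mpr ⟨hmemr, hcm⟩
        have hmin : ∀ w, fbdQ n s w → ¬ fbdLt s w m := by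
          intro w hQ
          obtain ⟨hw1, hw2⟩ := (fbd_Q_iff n s w).mp hQ
          exact hmint w hw1 hw2
        exact fbd_loopA_found n s m hQm hmin 0 le_rfl (abs_nonneg _)
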